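-- pv_equiv track=rewrite | github.com/ivoadf/daily | ocurrences_matrix.py | ocurrences
-- ===== SOURCE A (Python) =====
-- def ocurrences(N,X):
--     total = 0
--     for i in range(N):
--         for j in range(0,i):
--             val = (i+1)*(j+1)
--             if val == X:
--                 total += 2
--     return total
-- ===== SOURCE B (Python) =====
-- def ocurrences(N, X):
--     # One pass over candidate factors a = 1..N: count a iff a divides X and the
--     # cofactor b = X // a lies in 1..N with b != a (each unordered pair is hit twice).
--     total = 0
--     for a in range(1, N + 1):
--         if X % a == 0:
--             b = X // a
--             if 1 <= b <= N and b != a: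
--                 total += 1
--     return total
-- ===== Notes on version B (the rewrite author's own statement) =====
-- stated objective: faster
-- what changed: Replaced the O(N^2) double loop over all index pairs by a single pass over a = 1..N that tests divisibility and checks the cofactor X//a is in range and distinct, counting each ordered factor pair once.
import Mathlib
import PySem

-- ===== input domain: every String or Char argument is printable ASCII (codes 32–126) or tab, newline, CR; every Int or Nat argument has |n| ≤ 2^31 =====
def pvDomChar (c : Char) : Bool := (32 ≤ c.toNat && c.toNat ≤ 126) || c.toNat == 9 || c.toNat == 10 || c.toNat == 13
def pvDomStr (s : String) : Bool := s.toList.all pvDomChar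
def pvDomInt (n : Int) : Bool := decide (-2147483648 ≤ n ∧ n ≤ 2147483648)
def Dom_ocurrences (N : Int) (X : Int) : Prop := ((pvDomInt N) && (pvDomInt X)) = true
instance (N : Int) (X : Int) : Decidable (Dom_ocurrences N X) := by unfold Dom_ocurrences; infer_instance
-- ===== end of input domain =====

-- B replaces A's double loop over all index pairs by a single pass over candidate
-- factors a = 1..N with a divisibility test on the cofactor X // a (objective: faster).

-- ===== PORT A =====
def ocurrences (N : Int) (X : Int) : Int :=
  (PySem.List.pyRange 0 N 1).foldl (fun total i =>
    (PySem.List.pyRange 0 i 1).foldl (fun total j =>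
      if (i + 1) * (j + 1) = X then total + 2 else total) total) 0

-- ===== PORT B =====
def ocurrences_alt (N : Int) (X : Int) : Int :=
  (PySem.List.pyRange 1 (N + 1) 1).foldl (fun total a =>
    if PySem.Int.mod X a = 0 then
      let b := PySem.Int.floordiv X a
      if 1 ≤ b ∧ b ≤ N ∧ b ≠ a then total + 1 else total
    else total) 0

-- ===== PRECONDITION & SPEC =====
def Spec_ocurrences (N : Int) (X : Int) (out : Int) : Prop := out = ocurrences_alt N X
instance (N : Int) (X : Int) (out : Int) : Decidable (Spec_ocurrences N X out) := by unfold Spec_ocurrences; infer_instance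

-- ===== CLAIM (what is proved, stated in full; the proofs are below) =====
def Claim_equal_ocurrences : Prop := ∀ (N : Int) (X : Int), Dom_ocurrences N X → Spec_ocurrences N X (ocurrences N X)

-- ===== LEMMAS AND PROOFS =====

-- proof-side helpers: the ordered factor pairs (a, b) with a*b = X, both in 1..N, a ≠ b,
-- and the half of them with the second component smaller
noncomputable def pvS (N X : Int) : Finset (Int × Int) :=
  ((Finset.Icc 1 N) ×ˢ (Finset.Icc 1 N)).filter (fun p => p.1 * p.2 = X ∧ p.1 ≠ p.2)
noncomputable def pvT (N X : Int) : Finset (Int × Int) := (pvS N X).filter (fun p => p.2 < p.1)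

-- B counts exactly the pairs of pvS
lemma alt_eq_card (N X : Int) : ocurrences_alt N X = ((pvS N X).card : Int) := by
  have hsum : ocurrences_alt N X =
      ∑ a ∈ Finset.Icc 1 N, (if a ∣ X ∧ 1 ≤ X / a ∧ X / a ≤ N ∧ X / a ≠ a then (1:Int) else 0) := by
    unfold ocurrences_alt
    have hstep : (fun (total a : Int) =>
        if PySem.Int.mod X a = 0 then
          let b := PySem.Int.floordiv X a
          if 1 ≤ b ∧ b ≤ N ∧ b ≠ a then total + 1 else total
        else total) = fun total a => total +
          (if PySem.Int.mod X a = 0 then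
            (if 1 ≤ PySem.Int.floordiv X a ∧ PySem.Int.floordiv X a ≤ N ∧ PySem.Int.floordiv X a ≠ a
             then (1:Int) else 0) else 0) := by
      funext total a
      by_cases h1 : PySem.Int.mod X a = 0 <;>
        by_cases h2 : 1 ≤ PySem.Int.floordiv X a ∧ PySem.Int.floordiv X a ≤ N ∧ PySem.Int.floordiv X a ≠ a <;>
        simp [h1, h2]
    rw [hstep, PySem.List.foldl_add, zero_add,
        ← List.sum_toFinset _ (PySem.List.nodup_pyRange_one 1 (N+1))]
    have hset : (PySem.List.pyRange 1 (N + 1) 1).toFinset = Finset.Icc 1 N := by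
      ext x
      simp [List.mem_toFinset, PySem.List.mem_pyRange_one, Finset.mem_Icc]
    rw [hset]
    refine Finset.sum_congr rfl (fun a ha => ?_)
    rw [Finset.mem_Icc] at ha
    simp only [PySem.Int.floordiv_eq_ediv_of_pos (show (0:Int) < a by omega)]
    by_cases hd : a ∣ X
    · simp [PySem.Int.mod_eq_zero_iff_dvd, hd]
    · simp [(PySem.Int.mod_eq_zero_iff_dvd X a).not.mpr hd, hd]
  rw [hsum, Finset.sum_boole]
  congr 1
  apply Finset.card_nbij' (i := fun a => (a, X / a)) (j := fun p => p.1)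
  · intro a ha
    simp only [Finset.mem_coe, Finset.mem_filter, Finset.mem_Icc] at ha
    obtain ⟨⟨h1, h2⟩, hd, hb1, hb2, hne⟩ := ha
    simp only [pvS, Finset.mem_coe, Finset.mem_filter, Finset.mem_product, Finset.mem_Icc]
    refine ⟨⟨⟨h1, h2⟩, hb1, hb2⟩, Int.mul_ediv_cancel' hd, fun h => hne h.symm⟩
  · intro p hp
    simp only [pvS, Finset.mem_coe, Finset.mem_filter, Finset.mem_product, Finset.mem_Icc] at hp
    obtain ⟨⟨⟨ha1, ha2⟩, hb1, hb2⟩, hmul, hne⟩ := hp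
    have hdvd : p.1 ∣ X := ⟨p.2, hmul.symm⟩
    have hdiv : X / p.1 = p.2 := by
      rw [← hmul]; exact Int.mul_ediv_cancel_left p.2 (by omega)
    simp only [Finset.mem_coe, Finset.mem_filter, Finset.mem_Icc, hdiv]
    exact ⟨⟨ha1, ha2⟩, hdvd, hb1, hb2, fun h => hne h.symm⟩
  · intro a _; rfl
  · intro p hp
    simp only [pvS, Finset.mem_coe, Finset.mem_filter, Finset.mem_product, Finset.mem_Icc] at hp
    obtain ⟨⟨⟨ha1, _⟩, _⟩, hmul, _⟩ := hp
    have hdiv : X / p.1 = p.2 := by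
      rw [← hmul]; exact Int.mul_ediv_cancel_left p.2 (by omega)
    simp [hdiv]

-- A counts twice the pairs of pvT
lemma a_eq_card (N X : Int) : ocurrences N X = 2 * ((pvT N X).card : Int) := by
  have hsum : ocurrences N X =
      ∑ i ∈ Finset.Icc 0 (N - 1), ∑ j ∈ Finset.Icc 0 (i - 1),
        (if (i + 1) * (j + 1) = X then (2:Int) else 0) := by
    unfold ocurrences
    have hinner : ∀ i : Int,
        (fun (total j : Int) => if (i + 1) * (j + 1) = X then total + 2 else total) =
        fun total j => total + (if (i + 1) * (j + 1) = X then (2:Int) else 0) := by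
      intro i; funext total j; split_ifs <;> ring
    have hIcc : ∀ a : Int, (PySem.List.pyRange 0 a 1).toFinset = Finset.Icc 0 (a - 1) := by
      intro a; ext x
      simp [List.mem_toFinset, PySem.List.mem_pyRange_one, Finset.mem_Icc]
    have hstep : (fun (total i : Int) =>
        (PySem.List.pyRange 0 i 1).foldl (fun total j =>
          if (i + 1) * (j + 1) = X then total + 2 else total) total) =
        fun total i => total + ∑ j ∈ Finset.Icc 0 (i - 1),
          (if (i + 1) * (j + 1) = X then (2:Int) else 0) := by
      funext total i
      rw [hinner i, PySem.List.foldl_add,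
          ← List.sum_toFinset _ (PySem.List.nodup_pyRange_one 0 i), hIcc i]
    rw [hstep, PySem.List.foldl_add, zero_add,
        ← List.sum_toFinset _ (PySem.List.nodup_pyRange_one 0 N), hIcc N]
  rw [hsum]
  have h1 : ∀ i ∈ Finset.Icc 0 (N - 1),
      (∑ j ∈ Finset.Icc 0 (i - 1), (if (i + 1) * (j + 1) = X then (2:Int) else 0)) =
      ∑ j ∈ Finset.Icc 0 (N - 1), (if j < i ∧ (i + 1) * (j + 1) = X then (2:Int) else 0) := by
    intro i hi
    rw [Finset.mem_Icc] at hi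
    have hfil : Finset.Icc 0 (i - 1) = (Finset.Icc 0 (N - 1)).filter (fun j => j < i) := by
      ext j; simp [Finset.mem_filter, Finset.mem_Icc]; omega
    rw [hfil, Finset.sum_filter]
    refine Finset.sum_congr rfl (fun j _ => ?_)
    by_cases hj : j < i <;> by_cases hc : (i + 1) * (j + 1) = X <;> simp [hj, hc]
  rw [Finset.sum_congr rfl h1, ← Finset.sum_product']
  have h2 : ∀ p ∈ (Finset.Icc 0 (N-1)) ×ˢ (Finset.Icc 0 (N-1)),
      (if p.2 < p.1 ∧ (p.1 + 1) * (p.2 + 1) = X then (2:Int) else 0) =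
      2 * (if p.2 < p.1 ∧ (p.1 + 1) * (p.2 + 1) = X then (1:Int) else 0) := by
    intro p _; split_ifs <;> ring
  rw [Finset.sum_congr rfl h2, ← Finset.mul_sum, Finset.sum_boole]
  congr 1
  norm_cast
  apply Finset.card_nbij' (i := fun p => (p.1 + 1, p.2 + 1)) (j := fun p => (p.1 - 1, p.2 - 1))
  · intro p hp
    simp only [Finset.mem_coe, Finset.mem_filter, Finset.mem_product, Finset.mem_Icc] at hp
    obtain ⟨⟨⟨hi0, hi1⟩, hj0, hj1⟩, hlt, hmul⟩ := hp
    simp only [pvT, pvS, Finset.mem_coe, Finset.mem_filter, Finset.mem_product, Finset.mem_Icc]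
    exact ⟨⟨⟨⟨by omega, by omega⟩, by omega, by omega⟩, hmul, by omega⟩, by omega⟩
  · intro p hp
    simp only [pvT, pvS, Finset.mem_coe, Finset.mem_filter, Finset.mem_product, Finset.mem_Icc] at hp
    obtain ⟨⟨⟨⟨ha1, ha2⟩, hb1, hb2⟩, hmul, hne⟩, hlt⟩ := hp
    simp only [Finset.mem_coe, Finset.mem_filter, Finset.mem_product, Finset.mem_Icc]
    refine ⟨⟨⟨by omega, by omega⟩, by omega, by omega⟩, by omega, ?_⟩
    simpa using hmul
  · intro p _; simp
  · intro p _; simp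

-- each unordered pair appears in pvS once in each order, so |pvS| = 2 |pvT|
lemma card_S_eq_two_T (N X : Int) : (pvS N X).card = 2 * (pvT N X).card := by
  have hsplit : pvS N X = pvT N X ∪ (pvS N X).filter (fun p => p.1 < p.2) := by
    ext p
    simp only [pvT, Finset.mem_union, Finset.mem_filter, pvS, Finset.mem_product]
    constructor
    · intro h
      rcases lt_or_gt_of_ne h.2.2 with hlt | hgt
      · exact Or.inr ⟨h, hlt⟩
      · exact Or.inl ⟨h, hgt⟩
    · rintro (⟨h, _⟩ | ⟨h, _⟩) <;> exact h
  have hdisj : Disjoint (pvT N X) ((pvS N X).filter (fun p => p.1 < p.2)) := by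
    rw [Finset.disjoint_left]
    intro p hp hq
    simp only [pvT, Finset.mem_filter] at hp hq
    omega
  have hswap : ((pvS N X).filter (fun p => p.1 < p.2)).card = (pvT N X).card := by
    apply Finset.card_nbij' (i := fun p => (p.2, p.1)) (j := fun p => (p.2, p.1))
    · intro p hp
      simp only [pvT, pvS, Finset.mem_coe, Finset.mem_filter, Finset.mem_product] at hp ⊢
      obtain ⟨⟨⟨hm1, hm2⟩, hmul, hne⟩, hlt⟩ := hp
      exact ⟨⟨⟨hm2, hm1⟩, by linarith [hmul, mul_comm p.1 p.2], fun h => hne h.symm⟩, hlt⟩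
    · intro p hp
      simp only [pvT, pvS, Finset.mem_coe, Finset.mem_filter, Finset.mem_product] at hp ⊢
      obtain ⟨⟨⟨hm1, hm2⟩, hmul, hne⟩, hlt⟩ := hp
      exact ⟨⟨⟨hm2, hm1⟩, by linarith [hmul, mul_comm p.1 p.2], fun h => hne h.symm⟩, hlt⟩
    · intro p _; simp
    · intro p _; simp
  rw [hsplit, Finset.card_union_of_disjoint hdisj, hswap]
  ring

-- ===== VERDICT (by name: the statement is the Claim_ definition above) =====
theorem ocurrences_spec : Claim_equal_ocurrences := by
  intro N X _
  show ocurrences N X = ocurrences_alt N X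
  rw [a_eq_card, alt_eq_card, card_S_eq_two_T]
  push_cast
  ring
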